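-- pv_equiv track=rewrite | github.com/bemayr/mcmsc-text-mining | exercise1/bernhard/nlp_preprocessing_trunk.py | readFirstLine
-- ===== SOURCE A (Python) =====
-- def readFirstLine(line):
--     i = 0
--     indexID = -1
--     indexTitle = -1
--     indexDesc= -1
--     for elem in line:
--         if elem == 'ID':
--             indexID = i
--         elif elem == 'Title':
--             indexTitle = i
--         elif elem == 'Description':
--             indexDesc = i
--         i += 1
--     return (indexID, indexTitle, indexDesc)
-- ===== SOURCE B (Python) =====
-- def readFirstLine(line):
--     def last(key):
--         for j in range(len(line) - 1, -1, -1):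
--             if line[j] == key:
--                 return j
--         return -1
--     return (last('ID'), last('Title'), last('Description'))
-- ===== Notes on version B (the rewrite author's own statement) =====
-- stated objective: alternative
-- what changed: Replaces the single forward pass maintaining three last-seen variables with three independent backward scans that early-return the first (i.e. last-in-forward-order) match per key.
import Mathlib
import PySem

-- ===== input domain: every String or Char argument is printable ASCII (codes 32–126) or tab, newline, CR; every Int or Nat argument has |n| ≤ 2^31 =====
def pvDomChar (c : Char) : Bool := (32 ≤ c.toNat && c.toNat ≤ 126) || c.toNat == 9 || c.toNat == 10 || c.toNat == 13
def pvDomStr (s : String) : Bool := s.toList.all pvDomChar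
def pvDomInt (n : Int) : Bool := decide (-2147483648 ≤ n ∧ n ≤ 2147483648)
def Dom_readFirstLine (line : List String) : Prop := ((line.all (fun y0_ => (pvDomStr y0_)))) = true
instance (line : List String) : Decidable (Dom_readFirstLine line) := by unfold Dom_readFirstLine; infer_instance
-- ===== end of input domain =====

-- B replaces A's single forward pass carrying three last-seen variables with three independent backward scans, each early-returning the last occurrence of its key; objective: alternative.


-- ===== PORT A =====
-- state: (i, indexID, indexTitle, indexDesc); elif chain in the same order
def readFirstLine (line : List String) : Int × Int × Int :=
  let st := line.foldl (fun (st : Int × Int × Int × Int) elem =>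
      if elem = "ID" then (st.1 + 1, st.1, st.2.2.1, st.2.2.2)
      else if elem = "Title" then (st.1 + 1, st.2.1, st.1, st.2.2.2)
      else if elem = "Description" then (st.1 + 1, st.2.1, st.2.2.1, st.1)
      else (st.1 + 1, st.2.1, st.2.2.1, st.2.2.2)) (0, -1, -1, -1)
  (st.2.1, st.2.2.1, st.2.2.2)

-- ===== PORT B =====
-- last(key): for j in range(len(line)-1, -1, -1): if line[j] == key: return j; return -1
-- (structural countdown on the index; line[j]? is always in range at every call, so it is exact for line[j])
def rflLast (xs : List String) (key : String) : Nat → Int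
  | 0 => -1
  | k + 1 => if xs[k]? = some key then (k : Int) else rflLast xs key k

def readFirstLine_alt (line : List String) : Int × Int × Int :=
  (rflLast line "ID" line.length, rflLast line "Title" line.length,
   rflLast line "Description" line.length)

-- ===== PRECONDITION & SPEC =====
def Spec_readFirstLine (line : List String) (out : Int × Int × Int) : Prop := out = readFirstLine_alt line
instance (line : List String) (out : Int × Int × Int) : Decidable (Spec_readFirstLine line out) := by unfold Spec_readFirstLine; infer_instance

-- ===== CLAIM (what is proved, stated in full; the proofs are below) =====
def Claim_equal_readFirstLine : Prop := ∀ (line : List String), Dom_readFirstLine line → Spec_readFirstLine line (readFirstLine line)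

-- ===== LEMMAS AND PROOFS =====

-- last occurrence index of key in a list, as an Option Nat
def lastPos (key : String) : List String → Option Nat
  | [] => none
  | e :: r =>
    match lastPos key r with
    | some p => some (p + 1)
    | none => if e = key then some 0 else none

theorem lastPos_concat (key e : String) (xs : List String) :
    lastPos key (xs ++ [e]) = if e = key then some xs.length else lastPos key xs := by
  induction xs with
  | nil => simp [lastPos]
  | cons x xs ih =>
    simp only [List.cons_append, lastPos, ih]
    by_cases h : e = key <;> cases hx : lastPos key xs <;> simp [h]

-- B's backward scan up to index k computes the last occurrence within line.take k
theorem rflLast_char (xs : List String) (key : String) :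
    ∀ k, k ≤ xs.length →
      rflLast xs key k = (match lastPos key (xs.take k) with
                            | some p => (p : Int)
                            | none => -1) := by
  intro k
  induction k with
  | zero => intro _; simp [rflLast, lastPos]
  | succ k ih =>
    intro hk
    have hk' : k < xs.length := by omega
    rw [List.take_add_one, List.getElem?_eq_getElem hk']
    simp only [Option.toList_some]
    rw [lastPos_concat]
    simp only [rflLast]
    rw [List.getElem?_eq_getElem hk']
    by_cases h : xs[k] = key
    · simp [h, List.length_take, Nat.min_eq_left (le_of_lt hk')]
    · simp [h, ih (le_of_lt hk')]

-- A's fold, characterised component-wise by last occurrences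
theorem readFirstLine_fold_char (line : List String) :
    ∀ (i a b c : Int),
      line.foldl (fun (st : Int × Int × Int × Int) elem =>
        if elem = "ID" then (st.1 + 1, st.1, st.2.2.1, st.2.2.2)
        else if elem = "Title" then (st.1 + 1, st.2.1, st.1, st.2.2.2)
        else if elem = "Description" then (st.1 + 1, st.2.1, st.2.2.1, st.1)
        else (st.1 + 1, st.2.1, st.2.2.1, st.2.2.2)) (i, a, b, c)
      = (i + line.length,
         (match lastPos "ID" line with | some p => i + p | none => a),
         (match lastPos "Title" line with | some p => i + p | none => b),
         (match lastPos "Description" line with | some p => i + p | none => c)) := by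
  induction line with
  | nil => intro i a b c; simp [lastPos]
  | cons e r ih =>
    intro i a b c
    simp only [List.foldl_cons, List.length_cons]
    by_cases h1 : e = "ID"
    · subst h1
      simp only [String.reduceEq, if_true, if_false]
      rw [ih]
      cases hI : lastPos "ID" r <;> cases hT : lastPos "Title" r <;>
        cases hD : lastPos "Description" r <;>
          simp [lastPos, hI, hT, hD, add_comm, add_left_comm]
    · by_cases h2 : e = "Title"
      · subst h2
        simp only [String.reduceEq, if_true, if_false]
        rw [ih]
        cases hI : lastPos "ID" r <;> cases hT : lastPos "Title" r <;>
          cases hD : lastPos "Description" r <;>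
            simp [lastPos, hI, hT, hD, add_comm, add_left_comm]
      · by_cases h3 : e = "Description"
        · subst h3
          simp only [String.reduceEq, if_true, if_false]
          rw [ih]
          cases hI : lastPos "ID" r <;> cases hT : lastPos "Title" r <;>
            cases hD : lastPos "Description" r <;>
              simp [lastPos, hI, hT, hD, add_comm, add_left_comm]
        · rw [if_neg h1, if_neg h2, if_neg h3, ih]
          cases hI : lastPos "ID" r <;> cases hT : lastPos "Title" r <;>
            cases hD : lastPos "Description" r <;>
              simp [lastPos, hI, hT, hD, h1, h2, h3, add_comm, add_left_comm]

-- ===== VERDICT (by name: the statement is the Claim_ definition above) =====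
theorem readFirstLine_spec : Claim_equal_readFirstLine := by
  intro line _
  show _ = _
  unfold readFirstLine readFirstLine_alt
  rw [readFirstLine_fold_char line 0 (-1) (-1) (-1)]
  rw [rflLast_char line "ID" line.length le_rfl,
      rflLast_char line "Title" line.length le_rfl,
      rflLast_char line "Description" line.length le_rfl]
  simp only [List.take_length]
  cases hI : lastPos "ID" line <;> cases hT : lastPos "Title" line <;>
    cases hD : lastPos "Description" line <;> simp
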